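-- pv_equiv track=rewrite | github.com/hoik92/Algorithm-python-java- | my_hobby/test2.py | solution
-- ===== SOURCE A (Python) =====
-- def solution(arr):
--     count = {}
--     result = []
--     for i in range(len(arr)):
--         if count.get(arr[i]):
--             result.append(i - count[arr[i]][1])
--             count[arr[i]] = [count[arr[i]][0] + 1, i]
--         else:
--             count[arr[i]] = [1, i]
--     if not result:
--         return -1
--     return min(result)
-- ===== SOURCE B (Python) =====
-- def solution(arr):
--     best = -1
--     for j in range(1, len(arr)):
--         for i in range(j - 1, -1, -1):
--             if arr[i] == arr[j]:
--                 d = j - i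
--                 if best == -1 or d < best:
--                     best = d
--                 break
--     return best
-- ===== Notes on version B (the rewrite author's own statement) =====
-- stated objective: simpler
-- what changed: Replaces A's dict of [count,last-index] plus a collected gaps list with a plain nested loop: for each position a backward scan finds the nearest previous equal element and a running minimum (sentinel -1) replaces building the list and calling min.
import Mathlib
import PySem

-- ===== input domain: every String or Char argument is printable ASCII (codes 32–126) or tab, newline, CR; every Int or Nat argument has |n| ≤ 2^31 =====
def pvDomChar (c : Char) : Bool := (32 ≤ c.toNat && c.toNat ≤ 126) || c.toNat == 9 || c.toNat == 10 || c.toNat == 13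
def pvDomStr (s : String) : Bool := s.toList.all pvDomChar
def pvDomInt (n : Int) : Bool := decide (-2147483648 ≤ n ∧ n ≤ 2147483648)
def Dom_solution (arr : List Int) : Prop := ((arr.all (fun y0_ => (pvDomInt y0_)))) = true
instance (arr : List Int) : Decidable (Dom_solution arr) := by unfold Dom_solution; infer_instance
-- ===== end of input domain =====

-- B replaces A's dict-of-last-indices pass with a simpler nested backward scan and a running minimum.

-- ===== PORT A =====
-- 'if count.get(arr[i])': the stored value is always the non-empty list [c, i], so Python's
-- truthiness test is exactly key presence; we port the value as the pair (c, i) and test presence.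
def solution (arr : List Int) : Int :=
  let st := (PySem.List.pyRange 0 (arr.length : Int) 1).foldl
      (fun (st : List Int × PySem.Dict Int (Int × Int)) i =>
        let x := PySem.List.pyGetD arr i 0
        match st.2.get? x with
        | some cl => (st.1 ++ [i - cl.2], st.2.insert x (cl.1 + 1, i))
        | none    => (st.1, st.2.insert x (1, i)))
      ([], PySem.Dict.empty)
  if st.1 = [] then -1
  else
    match PySem.List.min? st.1 (fun y => y) with
    | some m => m
    | none => -1   -- unreachable: st.1 ≠ []

-- ===== PORT B =====
-- inner 'for i in range(j-1, -1, -1): … break': first hit of the backward scan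
def scanBack (arr : List Int) (x : Int) : List Int → Option Int
  | [] => none
  | i :: rest => if PySem.List.pyGetD arr i 0 = x then some i else scanBack arr x rest

def solution_alt (arr : List Int) : Int :=
  (PySem.List.pyRange 1 (arr.length : Int) 1).foldl
    (fun best j =>
      match scanBack arr (PySem.List.pyGetD arr j 0) (PySem.List.pyRange (j - 1) (-1) (-1)) with
      | some i =>
        let d := j - i
        if best = -1 ∨ d < best then d else best
      | none => best)
    (-1)

-- ===== PRECONDITION & SPEC =====
def Spec_solution (arr : List Int) (out : Int) : Prop := out = solution_alt arr
instance (arr : List Int) (out : Int) : Decidable (Spec_solution arr out) := by unfold Spec_solution; infer_instance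

-- ===== CLAIM (what is proved, stated in full; the proofs are below) =====
def Claim_equal_solution : Prop := ∀ (arr : List Int), Dom_solution arr → Spec_solution arr (solution arr)

-- ===== LEMMAS AND PROOFS =====

-- last index l < k with arr[l] = v (proof-side characterisation shared by both ports)
def lastIdx (arr : List Int) (v : Int) : Nat → Option Nat
  | 0 => none
  | k+1 => if arr.getD k 0 = v then some k else lastIdx arr v k

-- the gaps A collects while scanning the first k elements, in order
def gaps (arr : List Int) : Nat → List Int
  | 0 => []
  | k+1 => gaps arr k ++ (match lastIdx arr (arr.getD k 0) k with
      | some l => [(k : Int) - (l : Int)]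
      | none => [])

lemma lastIdx_lt (arr : List Int) (v : Int) : ∀ k l, lastIdx arr v k = some l → l < k := by
  intro k
  induction k with
  | zero => intro l h; simp [lastIdx] at h
  | succ k ih =>
    intro l h
    simp only [lastIdx] at h
    split at h
    · cases h; omega
    · have := ih l h; omega

lemma gaps_pos (arr : List Int) : ∀ k g, g ∈ gaps arr k → 0 < g := by
  intro k
  induction k with
  | zero => intro g h; simp [gaps] at h
  | succ k ih =>
    intro g h
    simp only [gaps, List.mem_append] at h
    rcases h with h | h
    · exact ih g h
    · split at h
      · rename_i l hl
        have := lastIdx_lt arr _ k l hl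
        simp at h
        omega
      · simp at h

lemma A_loop (arr : List Int) : ∀ k, k ≤ arr.length →
    ∃ (d : PySem.Dict Int (Int × Int)) (cnt : Int → Int),
      (PySem.List.pyRange 0 (k : Int) 1).foldl
        (fun (st : List Int × PySem.Dict Int (Int × Int)) i =>
          let x := PySem.List.pyGetD arr i 0
          match st.2.get? x with
          | some cl => (st.1 ++ [i - cl.2], st.2.insert x (cl.1 + 1, i))
          | none    => (st.1, st.2.insert x (1, i)))
        ([], PySem.Dict.empty) = (gaps arr k, d) ∧
      ∀ v, d.get? v = (lastIdx arr v k).map (fun l => (cnt v, (l : Int))) := by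
  intro k
  induction k with
  | zero =>
    intro _
    refine ⟨PySem.Dict.empty, fun _ => 0, ?_, ?_⟩
    · rfl
    · intro v; simp [lastIdx, PySem.Dict.get?_empty]
  | succ k ih =>
    intro hk
    obtain ⟨d, cnt, hfold, hget⟩ := ih (by omega)
    have hcast : ((k + 1 : Nat) : Int) = (k : Int) + 1 := by push_cast; ring
    rw [hcast, PySem.List.pyRange_one_succ_right (by omega), List.foldl_append, hfold]
    simp only [List.foldl_cons, List.foldl_nil]
    have hget' : PySem.List.pyGetD arr (k : Int) 0 = arr.getD k 0 := by
      simp [PySem.List.pyGetD_natCast]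
    rw [hget']
    generalize hx : arr.getD k 0 = x at *
    cases hli : lastIdx arr x k with
    | some l =>
      have hdx : d.get? x = some (cnt x, (l : Int)) := by rw [hget x, hli]; rfl
      refine ⟨d.insert x (cnt x + 1, (k : Int)),
        fun v => if v = x then cnt x + 1 else cnt v, ?_, ?_⟩
      · simp only [hdx, gaps, hx, hli]
      · intro v
        by_cases hv : v = x
        · subst hv
          rw [PySem.Dict.get?_insert_self]
          have hx' : arr[k]?.getD 0 = v := hx
          simp [lastIdx, hx']
        · rw [PySem.Dict.get?_insert_of_ne (hne := hv), hget v]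
          have : lastIdx arr v (k+1) = lastIdx arr v k := by
            simp only [lastIdx]
            rw [if_neg (by rw [hx]; exact fun h => hv h.symm)]
          rw [this]
          simp [hv]
    | none =>
      have hdx : d.get? x = none := by rw [hget x, hli]; rfl
      refine ⟨d.insert x (1, (k : Int)),
        fun v => if v = x then 1 else cnt v, ?_, ?_⟩
      · simp only [hdx, gaps, hx, hli, List.append_nil]
      · intro v
        by_cases hv : v = x
        · subst hv
          rw [PySem.Dict.get?_insert_self]
          have hx' : arr[k]?.getD 0 = v := hx
          simp [lastIdx, hx']
        · rw [PySem.Dict.get?_insert_of_ne (hne := hv), hget v]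
          have : lastIdx arr v (k+1) = lastIdx arr v k := by
            simp only [lastIdx]
            rw [if_neg (by rw [hx]; exact fun h => hv h.symm)]
          rw [this]
          simp [hv]

lemma scanBack_eq (arr : List Int) (x : Int) : ∀ j : Nat,
    scanBack arr x (PySem.List.pyRange ((j : Int) - 1) (-1) (-1)) =
      (lastIdx arr x j).map (fun l => (l : Int)) := by
  intro j
  induction j with
  | zero =>
    rw [PySem.List.pyRange_neg_one_eq_nil (by omega)]
    rfl
  | succ j ih =>
    have h1 : ((j + 1 : Nat) : Int) - 1 = (j : Int) := by push_cast; ring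
    rw [h1, PySem.List.pyRange_neg_one_cons (by omega)]
    simp only [scanBack, lastIdx, PySem.List.pyGetD_natCast]
    split
    · simp
    · rw [ih]

lemma B_loop (arr : List Int) : ∀ k, k ≤ arr.length →
    (PySem.List.pyRange 1 (k : Int) 1).foldl
      (fun best j =>
        match scanBack arr (PySem.List.pyGetD arr j 0) (PySem.List.pyRange (j - 1) (-1) (-1)) with
        | some i =>
          let d := j - i
          if best = -1 ∨ d < best then d else best
        | none => best)
      (-1) =
    (gaps arr k).foldl (fun best d => if best = -1 ∨ d < best then d else best) (-1) := by
  intro k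
  induction k with
  | zero => intro _; rfl
  | succ k ih =>
    intro hk
    have hk' : k ≤ arr.length := by omega
    by_cases h0 : k = 0
    · subst h0
      rw [PySem.List.pyRange_one_eq_nil (by norm_num)]
      simp [gaps, lastIdx]
    · have hcast : ((k + 1 : Nat) : Int) = (k : Int) + 1 := by push_cast; ring
      rw [hcast, PySem.List.pyRange_one_succ_right (by omega), List.foldl_append]
      rw [ih hk']
      simp only [List.foldl_cons, List.foldl_nil]
      rw [show ((k : Int)) - 1 = ((k : Nat) : Int) - 1 from rfl]
      rw [scanBack_eq arr _ k]
      have hget : PySem.List.pyGetD arr (k : Int) 0 = arr.getD k 0 := by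
        simp [PySem.List.pyGetD_natCast]
      rw [hget]
      simp only [gaps]
      cases hli : lastIdx arr (arr.getD k 0) k with
      | none => simp
      | some l => simp [List.foldl_append]

lemma foldl_min'_pos : ∀ (l : List Int) (b : Int), 0 < b → (∀ g ∈ l, 0 < g) →
    l.foldl (fun best d => if best = -1 ∨ d < best then d else best) b = l.foldl min b := by
  intro l
  induction l with
  | nil => intro b _ _; rfl
  | cons g t ih =>
    intro b hb hl
    simp only [List.foldl_cons]
    have hg : 0 < g := hl g (by simp)
    have h1 : (if b = -1 ∨ g < b then g else b) = min b g := by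
      rcases lt_or_ge g b with h | h <;> simp [min_def] <;> omega
    rw [h1, ih (min b g) (by omega) (fun x hx => hl x (by simp [hx]))]

lemma foldl_min'_neg1_cons (g : Int) (t : List Int) (hl : ∀ x ∈ g :: t, 0 < x) :
    (g :: t).foldl (fun best d => if best = -1 ∨ d < best then d else best) (-1) =
      t.foldl min g := by
  simp only [List.foldl_cons]
  have h0 : (if True ∨ g < (-1:Int) then g else -1) = g := by simp
  rw [h0, foldl_min'_pos t g (hl g (by simp)) (fun x hx => hl x (by simp [hx]))]

-- ===== VERDICT (by name: the statement is the Claim_ definition above) =====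
theorem solution_spec : Claim_equal_solution := by
  unfold Claim_equal_solution
  intro arr _
  unfold Spec_solution solution solution_alt
  obtain ⟨d, cnt, hfold, -⟩ := A_loop arr arr.length le_rfl
  simp only [hfold]
  rw [B_loop arr arr.length le_rfl]
  cases hg : gaps arr arr.length with
  | nil => simp
  | cons g t =>
    rw [foldl_min'_neg1_cons g t (fun x hx => gaps_pos arr arr.length x (hg ▸ hx))]
    simp [PySem.List.min?_id_cons]
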